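-- pv_equiv track=rewrite | github.com/huberf/clara-pip | clara/utils/story_reader.py | break_to_groups
-- ===== SOURCE A (Python) =====
-- def break_to_groups(lines):
--     groups = []
--     last = []
--     for i in lines:
--         for j in i:
--             if not j == '\t' and not j == ' ':
--                 if j == 'Q':
--                     groups += [last]
--                     last = []
--                 break
--         last += [i]
--     return groups[1:]
-- ===== SOURCE B (Python) =====
-- def break_to_groups(lines):
--     lines = list(lines)
--     starts = [i for i, l in enumerate(lines) if l.strip(' \t').startswith('Q')]
--     return [lines[a:b] for a, b in zip(starts, starts[1:])]
-- ===== Notes on version B (the rewrite author's own statement) =====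
-- stated objective: idiomatic
-- what changed: Replaces the stateful accumulator loop (char-scan with break, running 'last' buffer, trailing groups[1:]) by an index-based formulation: collect the indices of Q-lines once with enumerate + strip, then slice the line list between consecutive Q indices.
import Mathlib
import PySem

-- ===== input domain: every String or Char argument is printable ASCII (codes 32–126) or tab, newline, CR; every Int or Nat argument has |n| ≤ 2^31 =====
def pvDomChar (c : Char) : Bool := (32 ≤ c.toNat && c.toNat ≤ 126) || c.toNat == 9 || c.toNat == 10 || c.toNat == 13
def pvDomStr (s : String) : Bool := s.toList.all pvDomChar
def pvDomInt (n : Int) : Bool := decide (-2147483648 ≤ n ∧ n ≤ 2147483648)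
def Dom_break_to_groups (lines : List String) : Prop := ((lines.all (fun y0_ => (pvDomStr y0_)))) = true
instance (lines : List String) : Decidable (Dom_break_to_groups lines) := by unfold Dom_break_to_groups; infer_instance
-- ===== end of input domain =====

-- B replaces A's stateful accumulator loop by an index-based decomposition (collect Q-line
-- indices once, then slice between consecutive indices); objective: idiomatic, same cost.

-- ===== PORT A =====
-- inner 'for j in i: …; break' of A: first char that is not tab/space decides; all-ws line decides nothing
def scanA : List Char → Bool
  | [] => false
  | c :: rest => if ¬(c = '\t') ∧ ¬(c = ' ') then (c == 'Q') else scanA rest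

-- outer loop of A over lines with state (groups, last)
def loopA : List String → List (List String) → List String → List (List String) × List String
  | [], groups, last => (groups, last)
  | i :: rest, groups, last =>
    if scanA i.toList then loopA rest (groups ++ [last]) ([] ++ [i])
    else loopA rest groups (last ++ [i])

def break_to_groups (lines : List String) : List (List String) :=
  PySem.List.slice (loopA lines [] []).1 (some 1) none

-- ===== PORT B =====
def qB (l : String) : Bool := PySem.Str.startswith (PySem.Str.stripChars l " \t") "Q"

def break_to_groups_alt (lines : List String) : List (List String) :=
  let starts := ((PySem.List.enumerate lines).filter (fun p => qB p.2)).map (fun p => p.1)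
  (starts.zip starts.tail).map (fun p => PySem.List.slice lines (some p.1) (some p.2))

-- ===== PRECONDITION & SPEC =====
def Spec_break_to_groups (lines : List String) (out : List (List String)) : Prop := out = break_to_groups_alt lines
instance (lines : List String) (out : List (List String)) : Decidable (Spec_break_to_groups lines out) := by unfold Spec_break_to_groups; infer_instance

-- ===== CLAIM (what is proved, stated in full; the proofs are below) =====
def Claim_equal_break_to_groups : Prop := ∀ (lines : List String), Dom_break_to_groups lines → Spec_break_to_groups lines (break_to_groups lines)

-- ===== LEMMAS AND PROOFS =====

-- the whitespace predicate used by stripChars with chars " \t"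
def pws (c : Char) : Bool := [' ', '\t'].contains c

-- the Nat indices of the Q-lines
def idxs : List String → List Nat
  | [] => []
  | i :: rest => if scanA i.toList then 0 :: (idxs rest).map (· + 1) else (idxs rest).map (· + 1)

-- chunks of lines between consecutive Q indices (Nat drop/take form of B's slices)
def chunksN (lines : List String) : List (List String) :=
  ((idxs lines).zip (idxs lines).tail).map (fun p => ((lines.drop p.1).take (p.2 - p.1)))

-- A's emitted sections (groups, before the final drop of the first one)
def gsec : List String → List String → List (List String)
  | [], _ => []
  | i :: rest, last =>
    if scanA i.toList then last :: gsec rest [i] else gsec rest (last ++ [i])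

lemma scanA_pws (c : Char) (t : List Char) (h : pws c = true) :
    scanA (c :: t) = scanA t := by
  have : ¬ (¬(c = '\t') ∧ ¬(c = ' ')) := by
    simp only [pws, List.contains_eq_mem, List.mem_cons, List.mem_singleton,
      decide_eq_true_eq] at h
    tauto
  simp [scanA, this]

lemma scanA_not_pws (c : Char) (t : List Char) (h : pws c = false) :
    scanA (c :: t) = (c == 'Q') := by
  have : (¬(c = '\t') ∧ ¬(c = ' ')) := by
    simp only [pws, List.contains_eq_mem, List.mem_cons, List.mem_singleton,
      decide_eq_false_iff_not] at h
    tauto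
  simp [scanA, this]

-- stripChars-then-startswith coincides with A's first-non-ws-char test
lemma chars_q (cs : List Char) :
    PySem.Chars.startswith (PySem.Chars.stripChars cs [' ', '\t']) ['Q'] = scanA cs := by
  induction cs with
  | nil => decide
  | cons c t ih =>
    by_cases hc : pws c = true
    · have h1 : List.dropWhile (fun x => ([' ', '\t']).contains x) (c :: t)
          = List.dropWhile (fun x => ([' ', '\t']).contains x) t := by
        have h0 : c = ' ' ∨ c = '\t' := by simpa [pws] using hc
        rcases h0 with h0 | h0 <;> simp [List.dropWhile_cons, h0]
      rw [scanA_pws c t hc, ← ih]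
      simp only [PySem.Chars.stripChars, h1]
    · have hc' : pws c = false := by simpa using hc
      have hpc : (fun x => ([' ', '\t']).contains x) c = false := hc'
      rw [scanA_not_pws c t hc']
      simp only [PySem.Chars.stripChars, List.dropWhile_cons, hpc, Bool.false_eq_true,
        if_false, List.reverse_cons, List.dropWhile_append]
      split
      · simp [List.dropWhile, hpc, PySem.Chars.startswith, List.isPrefixOf, eq_comm]
      · simp [PySem.Chars.startswith, List.isPrefixOf, eq_comm]

lemma qB_eq_scanA (l : String) : qB l = scanA l.toList := by
  have h1 : (" \t" : String).toList = [' ', '\t'] := rfl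
  have h2 : ("Q" : String).toList = ['Q'] := rfl
  rw [qB, PySem.Str.startswith_eq, PySem.Str.toList_stripChars, h1, h2, chars_q]

-- A's loop computes the initial groups followed by the emitted sections
lemma loopA_fst (lines : List String) :
    ∀ (groups : List (List String)) (last : List String),
      (loopA lines groups last).1 = groups ++ gsec lines last := by
  induction lines with
  | nil => intro groups last; simp [loopA, gsec]
  | cons i rest ih =>
    intro groups last
    by_cases h : scanA i.toList = true
    · simp [loopA, gsec, h, ih]
    · simp only [Bool.not_eq_true] at h
      simp [loopA, gsec, h, ih]

-- idxs branches on the same test as B's filter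
lemma idxs_cons (i : String) (rest : List String) :
    idxs (i :: rest)
      = if qB i = true then 0 :: (idxs rest).map (· + 1) else (idxs rest).map (· + 1) := by
  rw [idxs, qB_eq_scanA]

-- B's starts list is the Nat index list, shifted by the enumerate start
lemma starts_eq (lines : List String) :
    ∀ (s : Int),
      ((PySem.List.enumerate lines s).filter (fun p => qB p.2)).map (fun p => p.1)
        = (idxs lines).map (fun (n : Nat) => s + (n : Int)) := by
  induction lines with
  | nil => intro s; simp [PySem.List.enumerate_nil, idxs]
  | cons i rest ih =>
    intro s
    rw [PySem.List.enumerate_cons]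
    by_cases h : qB i = true
    · rw [List.filter_cons]
      simp only [h, if_true, List.map_cons, idxs_cons, ih, List.map_map]
      congr 1
      · simp
      · apply List.map_congr_left
        intro n _
        simp only [Function.comp_apply]
        push_cast
        ring
    · simp only [Bool.not_eq_true] at h
      rw [List.filter_cons]
      simp only [h, Bool.false_eq_true, if_false, idxs_cons, ih, List.map_map]
      apply List.map_congr_left
      intro n _
      simp only [Function.comp_apply]
      push_cast
      ring

-- B's port, rewritten through Nat indices
lemma alt_eq_chunksN (lines : List String) : break_to_groups_alt lines = chunksN lines := by
  simp only [break_to_groups_alt]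
  have hs : ((PySem.List.enumerate lines).filter (fun p => qB p.2)).map (fun p => p.1)
      = (idxs lines).map (fun (n : Nat) => (n : Int)) := by
    rw [starts_eq lines 0]
    apply List.map_congr_left
    intro n _
    simp
  rw [hs, ← List.map_tail, List.zip_map, List.map_map, chunksN]
  apply List.map_congr_left
  intro p _
  obtain ⟨a, b⟩ := p
  simp only [Function.comp_apply, Prod.map_apply]
  rw [PySem.List.slice_natCast]

-- shifting all indices by one while consing a line preserves the chunks
lemma chunks_shift (ss : List Nat) (i : String) (rest : List String) :
    ((ss.map (· + 1)).zip ((ss.map (· + 1)).tail)).map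
        (fun p => (((i :: rest).drop p.1).take (p.2 - p.1)))
      = (ss.zip ss.tail).map (fun p => ((rest.drop p.1).take (p.2 - p.1))) := by
  rw [← List.map_tail, List.zip_map, List.map_map]
  apply List.map_congr_left
  intro p _
  obtain ⟨a, b⟩ := p
  simp [Nat.succ_sub_succ]

lemma chunksN_cons (i : String) (rest : List String) (h : scanA i.toList = false) :
    chunksN (i :: rest) = chunksN rest := by
  simp only [chunksN, idxs, h, Bool.false_eq_true, if_false]
  exact chunks_shift (idxs rest) i rest

-- the emitted sections are: (last ++ prefix up to the first Q) followed by the chunks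
lemma gsec_eq (lines : List String) :
    ∀ (last : List String),
      gsec lines last
        = match idxs lines with
          | [] => []
          | s :: _ => (last ++ lines.take s) :: chunksN lines := by
  induction lines with
  | nil => intro last; simp [gsec, idxs]
  | cons i rest ih =>
    intro last
    by_cases h : scanA i.toList = true
    · simp only [gsec, h, if_true, idxs, List.take_zero, List.append_nil]
      rw [ih [i]]
      cases hr : idxs rest with
      | nil =>
        simp only [chunksN, idxs, h, if_true, hr, List.map_nil]
        simp
      | cons s ss =>
        simp only [chunksN, idxs, h, if_true, hr, List.map_cons, List.zip_cons_cons,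
          List.tail_cons, List.map_cons]
        have hz : ((((s + 1) :: ss.map (· + 1)).zip (ss.map (· + 1))).map
            (fun p => (((i :: rest).drop p.1).take (p.2 - p.1))) :)
            = ((s :: ss).zip ss).map
                (fun p => ((rest.drop p.1).take (p.2 - p.1))) := by
          have h2 := chunks_shift (idxs rest) i rest
          rw [hr] at h2
          simpa using h2
        rw [hz]
        simp [chunksN, hr]
    · simp only [Bool.not_eq_true] at h
      simp only [gsec, h, Bool.false_eq_true, if_false, idxs]
      rw [ih (last ++ [i]), chunksN_cons i rest h]
      cases hr : idxs rest with
      | nil => simp [hr]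
      | cons s ss => simp [hr, List.take_succ_cons]

-- ===== VERDICT (by name: the statement is the Claim_ definition above) =====
theorem break_to_groups_spec : Claim_equal_break_to_groups := by
  intro lines _
  show break_to_groups lines = break_to_groups_alt lines
  rw [break_to_groups, PySem.List.slice_from_one, loopA_fst, List.nil_append,
    alt_eq_chunksN, gsec_eq lines []]
  cases hr : idxs lines with
  | nil => simp [chunksN, hr]
  | cons s ss => simp
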